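-- pv_equiv track=rewrite | github.com/HoangVuALB/bytebabel | src/bytebabel/ui/window.py | _parse_transcript_file
-- ===== SOURCE A (Python) =====
-- def _parse_transcript_file(text: str) -> tuple[str, str]:
--     """Parse saved transcript into (original, translation) sections."""
--     original = ""
--     translation = ""
--     current_section = None
--     lines: list[str] = []
--
--     for line in text.splitlines():
--         if line.startswith("=== Original ==="):
--             if current_section == "translation":
--                 translation = "\n".join(lines).strip()
--             current_section = "original"
--             lines = []
--         elif line.startswith("=== Translation ==="):
--             if current_section == "original":
--                 original = "\n".join(lines).strip()
--             current_section = "translation"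
--             lines = []
--         else:
--             lines.append(line)
--
--     if current_section == "original":
--         original = "\n".join(lines).strip()
--     elif current_section == "translation":
--         translation = "\n".join(lines).strip()
--
--     return original, translation
-- ===== SOURCE B (Python) =====
-- def _parse_transcript_file(text: str) -> tuple[str, str]:
--     """Parse saved transcript into (original, translation) sections.
--
--     Single backward scan: the first header of each kind met from the end is
--     the last occurrence, whose block (the lines gathered since the previous
--     header going backward) is that section's content.
--     """
--     original = None
--     translation = None
--     buf = []
--     for line in reversed(text.splitlines()):
--         if line.startswith("=== Original ==="):
--             if original is None:
--                 original = "\n".join(buf).strip()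
--             buf = []
--         elif line.startswith("=== Translation ==="):
--             if translation is None:
--                 translation = "\n".join(buf).strip()
--             buf = []
--         else:
--             buf.insert(0, line)
--     return (original if original is not None else "",
--             translation if translation is not None else "")
-- ===== Notes on version B (the rewrite author's own statement) =====
-- stated objective: alternative
-- what changed: Replaces the forward flush-on-boundary state machine (current_section + rolling buffer, with a final flush) by a single backward scan in which the first header of each kind met from the end fixes that section's block, so no section variable or end-of-loop flush is needed.
import Mathlib
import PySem

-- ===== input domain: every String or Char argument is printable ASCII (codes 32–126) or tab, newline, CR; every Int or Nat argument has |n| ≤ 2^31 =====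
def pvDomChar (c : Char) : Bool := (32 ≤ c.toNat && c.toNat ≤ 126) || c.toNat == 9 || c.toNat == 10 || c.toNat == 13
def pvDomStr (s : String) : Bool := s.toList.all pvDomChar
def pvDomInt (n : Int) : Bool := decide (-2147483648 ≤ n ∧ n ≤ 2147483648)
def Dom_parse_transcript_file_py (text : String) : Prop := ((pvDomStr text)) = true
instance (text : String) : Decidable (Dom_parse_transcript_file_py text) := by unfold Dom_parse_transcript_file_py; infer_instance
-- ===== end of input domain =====

-- B replaces A's forward flush-on-boundary state machine by a single backward scan
-- (first header of each kind seen from the end fixes that section); same O(n) cost.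

-- ===== PORT A =====
-- A's loop body: state = (original, translation, current_section, lines)
def pvStepA (s : String × String × Option String × List String) (line : String) :
    String × String × Option String × List String :=
  if PySem.Str.startswith line "=== Original ===" then
    (s.1,
     (if s.2.2.1 == some "translation" then PySem.Str.strip (PySem.Str.join "\n" s.2.2.2) else s.2.1),
     some "original", [])
  else if PySem.Str.startswith line "=== Translation ===" then
    ((if s.2.2.1 == some "original" then PySem.Str.strip (PySem.Str.join "\n" s.2.2.2) else s.1),
     s.2.1, some "translation", [])
  else
    (s.1, s.2.1, s.2.2.1, s.2.2.2 ++ [line])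

def parse_transcript_file_py (text : String) : String × String :=
  let s := (PySem.Str.splitlines text).foldl pvStepA ("", "", none, [])
  if s.2.2.1 == some "original" then (PySem.Str.strip (PySem.Str.join "\n" s.2.2.2), s.2.1)
  else if s.2.2.1 == some "translation" then (s.1, PySem.Str.strip (PySem.Str.join "\n" s.2.2.2))
  else (s.1, s.2.1)

-- ===== PORT B =====
-- B's backward loop over reversed(lines): accumulators (original?, translation?, buf)
def pvGo : List String → Option String → Option String → List String → String × String
  | [], o, t, _ => (o.getD "", t.getD "")
  | x :: rest, o, t, buf =>
    if PySem.Str.startswith x "=== Original ===" then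
      pvGo rest (if o.isNone then some (PySem.Str.strip (PySem.Str.join "\n" buf)) else o) t []
    else if PySem.Str.startswith x "=== Translation ===" then
      pvGo rest o (if t.isNone then some (PySem.Str.strip (PySem.Str.join "\n" buf)) else t) []
    else
      pvGo rest o t (x :: buf)

def parse_transcript_file_py_alt (text : String) : String × String :=
  pvGo (PySem.Str.splitlines text).reverse none none []

-- ===== PRECONDITION & SPEC =====
def Spec_parse_transcript_file_py (text : String) (out : String × String) : Prop := out = parse_transcript_file_py_alt text
instance (text : String) (out : String × String) : Decidable (Spec_parse_transcript_file_py text out) := by unfold Spec_parse_transcript_file_py; infer_instance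

-- ===== CLAIM (what is proved, stated in full; the proofs are below) =====
def Claim_equal_parse_transcript_file_py : Prop := ∀ (text : String), Dom_parse_transcript_file_py text → Spec_parse_transcript_file_py text (parse_transcript_file_py text)

-- ===== LEMMAS AND PROOFS =====

-- The backward scan over l.reverse, started with accumulators (o, t, buf), agrees with
-- A's forward fold state on l, with buf extending the current section's buffer.
lemma pvGo_eq (l : List String) : ∀ (o t : Option String) (buf : List String),
    pvGo l.reverse o t buf =
      (o.getD (if (l.foldl pvStepA ("", "", none, [])).2.2.1 == some "original"
          then PySem.Str.strip (PySem.Str.join "\n" ((l.foldl pvStepA ("", "", none, [])).2.2.2 ++ buf))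
          else (l.foldl pvStepA ("", "", none, [])).1),
       t.getD (if (l.foldl pvStepA ("", "", none, [])).2.2.1 == some "translation"
          then PySem.Str.strip (PySem.Str.join "\n" ((l.foldl pvStepA ("", "", none, [])).2.2.2 ++ buf))
          else (l.foldl pvStepA ("", "", none, [])).2.1)) := by
  induction l using List.reverseRecOn with
  | nil => intro o t buf; simp [pvGo, List.foldl]
  | append_singleton l x ih =>
    intro o t buf
    rw [List.reverse_append]
    simp only [List.reverse_singleton, List.singleton_append, List.foldl_append, List.foldl_cons,
      List.foldl_nil, pvGo]
    by_cases h1 : PySem.Str.startswith x "=== Original ===" = true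
    · simp only [h1, if_true, ih, pvStepA]
      cases o <;> simp
    · by_cases h2 : PySem.Str.startswith x "=== Translation ===" = true
      · simp only [h1, h2, if_true, ih, pvStepA]
        cases t <;> simp
      · simp only [h1, h2, ih, pvStepA]
        simp

-- ===== VERDICT (by name: the statement is the Claim_ definition above) =====
theorem parse_transcript_file_py_spec : Claim_equal_parse_transcript_file_py := by
  intro text _
  unfold Spec_parse_transcript_file_py parse_transcript_file_py parse_transcript_file_py_alt
  rw [pvGo_eq]
  set s := (PySem.Str.splitlines text).foldl pvStepA ("", "", none, []) with hs
  by_cases h1 : s.2.2.1 == some "original"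
  · simp only [h1, if_true]
    have hcur : s.2.2.1 = some "original" := by simpa using h1
    simp [hcur]
  · by_cases h2 : s.2.2.1 == some "translation"
    · simp [h1, h2]
    · simp [h1, h2]
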